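-- pv_equiv track=rewrite | github.com/Sunkek/abandoned-sunbot-layered | sunbot-bot/utils/utils.py | columns_to_table
-- ===== SOURCE A (Python) =====
-- def columns_to_table(columns, numerate=False):
--     if numerate:
--         nums = ['#'] + [i for i in range(1, len(columns[0])-1)] + ['']
--         columns = [nums] + columns
--     maxlens = [max(len(str(row)) for row in column) for column in columns]
--     table = []
--     for row in zip(*columns):
--         line = f'{row[0]:.<{maxlens[0]}}'
--         for num, value in enumerate(row[1:-1], 1):
--             line += f'.{value:.^{maxlens[num]}}'
--         line += f'.{row[-1]:.>{maxlens[-1]}}'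
--         table.append(line)
--     return '`' + '\n'.join(table) + '`'
-- ===== SOURCE B (Python) =====
-- def columns_to_table(columns, numerate=False):
--     if numerate:
--         nums = ['#'] + [i for i in range(1, len(columns[0]) - 1)] + ['']
--         columns = [nums] + columns
--     if not columns:
--         return '``'
--     widths = [max(len(str(cell)) for cell in col) for col in columns]
--     # layout slots: a left-aligned slot for the first column, a centered slot for
--     # each inner column, a right-aligned slot for the last column (with a single
--     # column, that one column fills both the left and the right slot)
--     slots = ([(columns[0], widths[0], 'l')]
--              + [(c, w, 'c') for c, w in zip(columns[1:-1], widths[1:-1])]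
--              + [(columns[-1], widths[-1], 'r')])
--     starts = []
--     pos = 0
--     for _, w, _ in slots:
--         starts.append(pos)
--         pos += w + 1
--     total = pos - 1
--     nrows = min(len(col) for col in columns)
--     lines = []
--     for i in range(nrows):
--         buf = ['.'] * total        # dot canvas; cells are spliced in at their offsets
--         for (col, w, align), start in zip(slots, starts):
--             s = str(col[i])
--             if align == 'l':
--                 off = start
--             elif align == 'r':
--                 off = start + w - len(s)
--             else:
--                 off = start + (w - len(s)) // 2
--             buf[off:off + len(s)] = list(s)
--         lines.append(''.join(buf))
--     return '`' + '\n'.join(lines) + '`'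
-- ===== Notes on version B (the rewrite author's own statement) =====
-- stated objective: alternative
-- what changed: B renders each line by allocating a dot-filled canvas of the full line width and splicing every cell in at an arithmetically computed offset (left/centre/right per slot), iterating rows by index, instead of A's row loop that pads each cell into a string and concatenates with dot separators.
import Mathlib
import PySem

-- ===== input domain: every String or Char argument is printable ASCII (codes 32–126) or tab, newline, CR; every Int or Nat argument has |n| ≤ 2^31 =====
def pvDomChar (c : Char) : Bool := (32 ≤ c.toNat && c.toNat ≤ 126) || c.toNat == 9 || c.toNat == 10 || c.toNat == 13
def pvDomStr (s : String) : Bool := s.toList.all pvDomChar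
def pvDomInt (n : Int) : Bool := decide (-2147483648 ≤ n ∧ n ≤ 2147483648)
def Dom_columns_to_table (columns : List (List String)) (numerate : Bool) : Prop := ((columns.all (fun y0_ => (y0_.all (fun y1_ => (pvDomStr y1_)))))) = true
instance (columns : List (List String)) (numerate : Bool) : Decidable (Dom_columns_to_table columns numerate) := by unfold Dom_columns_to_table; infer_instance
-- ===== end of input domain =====

-- B renders each line by splicing the cells into a dot-filled canvas at computed
-- offsets (index loop over rows) instead of A's pad-each-cell-and-join row loop;
-- alternative algorithm, same cost.


-- shared primitives: the Python format specs f'{x:.<w}', f'{x:.>w}', f'{x:.^w}'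
-- (CPython '^' puts the extra fill char on the right: left pad = total//2)
def pvPadL (s : String) (w : Nat) : List Char :=
  s.toList ++ List.replicate (w - s.toList.length) '.'
def pvPadR (s : String) (w : Nat) : List Char :=
  List.replicate (w - s.toList.length) '.' ++ s.toList
def pvPadC (s : String) (w : Nat) : List Char :=
  List.replicate ((w - s.toList.length) / 2) '.' ++ s.toList ++
    List.replicate ((w - s.toList.length) - (w - s.toList.length) / 2) '.'

-- nums = ['#'] + [i for i in range(1, len(columns[0])-1)] + ['']  (ints rendered as str(i):
-- both len(str(i)) and f'{i:...}' in A act on str(i), so carrying strings is exact).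
-- columns[0] on empty columns raises in Python (outside Pre_); headD [] is arbitrary there.
def pvNums (columns : List (List String)) : List String :=
  "#" :: ((PySem.List.pyRange 1 (((columns.headD []).length : Int) - 1) 1).map PySem.Int.toStr ++ [""])

-- max(len(str(row)) for row in column); Python raises ValueError on an empty column
-- (outside Pre_), where this returns 0; on nonempty columns foldl max 0 is Python's max.
def pvColMax (col : List String) : Nat := col.foldl (fun m s => max m s.toList.length) 0

theorem pvRows_sum_le {α : Type} (cols : List (List α)) :
    ((cols.map List.tail).map List.length).sum ≤ (cols.map List.length).sum := by
  induction cols with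
  | nil => simp
  | cons c cs ih =>
    simp only [List.map_cons, List.sum_cons]
    exact Nat.add_le_add (by simp [List.length_tail]) ih

theorem pvRows_dec {α : Type} (c : List α) (cs : List (List α)) (hc : c ≠ []) :
    (((c :: cs).map List.tail).map List.length).sum < ((c :: cs).map List.length).sum := by
  simp only [List.map_cons, List.sum_cons]
  have h1 : c.tail.length < c.length := by
    cases c with
    | nil => exact absurd rfl hc
    | cons a l => simp
  exact Nat.add_lt_add_of_lt_of_le h1 (pvRows_sum_le cs)

-- zip(*cols): rows of the transpose, truncating at the shortest column (zip() with no
-- iterables gives no rows)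
def pvRows {α : Type} (cols : List (List α)) : List (List α) :=
  if cols.isEmpty || cols.any List.isEmpty then []
  else (cols.flatMap (List.take 1)) :: pvRows (cols.map List.tail)
termination_by (cols.map List.length).sum
decreasing_by
  rename_i h
  simp only [Bool.or_eq_true, List.isEmpty_iff, List.any_eq_true, not_or, not_exists] at h
  obtain ⟨h1, h2⟩ := h
  cases cols with
  | nil => exact absurd rfl h1
  | cons c cs => exact pvRows_dec c cs (fun hc => h2 c ⟨by simp, hc⟩)

-- ===== PORT A =====
-- the body of A's row loop: line = f'{row[0]:.<{ms[0]}}'; for num, value in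
-- enumerate(row[1:-1], 1): line += f'.{value:.^{ms[num]}}'; line += f'.{row[-1]:.>{ms[-1]}}'
-- (rows of zip(*cols) are nonempty, so row[0]/row[-1] are headD/getLastD; num starts at 1
-- and stays nonnegative, so .toNat on it is exact; ms[num] is always in range here)
def pvLineA (ms : List Nat) (row : List String) : List Char :=
  ((PySem.List.enumerate (PySem.List.slice row (some 1) (some (-1))) 1).foldl
      (fun l p => l ++ '.' :: pvPadC p.2 (ms.getD p.1.toNat 0))
      (pvPadL (row.headD "") (ms.headD 0)))
    ++ '.' :: pvPadR (row.getLastD "") (ms.getLastD 0)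

def pvTableA (cols : List (List String)) : List (List Char) :=
  (pvRows cols).map (pvLineA (cols.map pvColMax))

def columns_to_table (columns : List (List String)) (numerate : Bool) : String :=
  String.ofList ('`' ::
    PySem.Chars.join ['\n']
      (pvTableA (if numerate then pvNums columns :: columns else columns)) ++ ['`'])

-- ===== PORT B =====
-- buf[off:off+len(s)] = list(s)  (Python list-slice assignment; on every input B reaches,
-- 0 ≤ off and off+len(s) ≤ len(buf), where take/++/drop is exactly the slice assignment)
def pvSplice (buf : List Char) (off : Nat) (s : List Char) : List Char :=
  buf.take off ++ s ++ buf.drop (off + s.length)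

-- the starts/pos loop: starts.append(pos); pos += w + 1   (returns (starts, final pos))
def pvStarts (slots : List (List String × Nat × Char)) (pos : Nat) : List Nat × Nat :=
  match slots with
  | [] => ([], pos)
  | s :: t =>
    let r := pvStarts t (pos + s.2.1 + 1)
    (pos :: r.1, r.2)

-- the off computation per alignment tag (w is the column max, so len ≤ w whenever used,
-- and Nat subtraction coincides with Python's)
def pvOff (start w len : Nat) (align : Char) : Nat :=
  if align = 'l' then start
  else if align = 'r' then start + w - len
  else start + (w - len) / 2

-- the inner loop of B: splice each slot's cell of row i into the dot canvas
def pvLineB (slotstarts : List ((List String × Nat × Char) × Nat)) (total i : Nat) :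
    List Char :=
  slotstarts.foldl
    (fun buf p =>
      let s := ((p.1.1).getD i "").toList
      pvSplice buf (pvOff p.2 p.1.2.1 s.length p.1.2.2) s)
    (List.replicate total '.')

def columns_to_table_alt (columns : List (List String)) (numerate : Bool) : String :=
  let cols := if numerate then pvNums columns :: columns else columns
  if cols.isEmpty then "``"
  else
    let ws := cols.map pvColMax
    let slots : List (List String × Nat × Char) :=
      (cols.headD [], ws.headD 0, 'l') ::
        (List.zipWith (fun c w => (c, w, 'c'))
            (PySem.List.slice cols (some 1) (some (-1)))
            (PySem.List.slice ws (some 1) (some (-1)))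
          ++ [(cols.getLastD [], ws.getLastD 0, 'r')])
    let st := pvStarts slots 0
    let nrows := (PySem.List.min? (cols.map List.length) (fun y => y)).getD 0
    String.ofList ('`' ::
      PySem.Chars.join ['\n']
        ((List.range nrows).map (fun i => pvLineB (slots.zip st.1) (st.2 - 1) i)) ++ ['`'])

-- ===== PRECONDITION & SPEC =====
-- A raises IndexError (it indexes columns[0]) when numerate is set and no columns are given,
-- and ValueError (max of an empty sequence) whenever some column is empty; Pre_ excludes
-- exactly those inputs.
def Pre_columns_to_table (columns : List (List String)) (numerate : Bool) : Prop :=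
  (numerate = true → columns ≠ []) ∧ (∀ c ∈ columns, c ≠ [])
instance (columns : List (List String)) (numerate : Bool) : Decidable (Pre_columns_to_table columns numerate) := by unfold Pre_columns_to_table; infer_instance

def pvWitness_columns_to_table : List (List String) × Bool := ([["ab", "c"], ["x", "yz"]], true)

def Spec_columns_to_table (columns : List (List String)) (numerate : Bool) (out : String) : Prop := out = columns_to_table_alt columns numerate
instance (columns : List (List String)) (numerate : Bool) (out : String) : Decidable (Spec_columns_to_table columns numerate out) := by unfold Spec_columns_to_table; infer_instance

-- ===== CLAIM (what is proved, stated in full; the proofs are below) =====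
def Claim_equal_columns_to_table : Prop := ∀ (columns : List (List String)) (numerate : Bool), Dom_columns_to_table columns numerate → Pre_columns_to_table columns numerate → Spec_columns_to_table columns numerate (columns_to_table columns numerate)

-- ===== LEMMAS AND PROOFS =====

-- proof-side helpers: the final canvas content, cells-with-offsets, well-spacedness
def pvLay (P : List Char) : List (List Char × Nat) → Nat → List Char
  | [], total => P ++ List.replicate (total - P.length) '.'
  | (s, o) :: t, total => pvLay (P ++ List.replicate (o - P.length) '.' ++ s) t total

def pvOk (pos : Nat) : List (List Char × Nat) → Nat → Prop
  | [], total => pos ≤ total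
  | (s, o) :: t, total => pos ≤ o ∧ pvOk (o + s.length) t total

-- the cell/offset list of the middle+last slots, with the running total
def pvCellsMid (rm : List String) (mm : List Nat) (b : Nat) (rl : String) (ml : Nat) :
    List (List Char × Nat) × Nat :=
  match rm, mm with
  | r :: rm', m :: mm' =>
    let rest := pvCellsMid rm' mm' (b + m + 1) rl ml
    ((r.toList, b + (m - r.toList.length) / 2) :: rest.1, rest.2)
  | _, _ => ([(rl.toList, b + (ml - rl.toList.length))], b + ml)

theorem pv_rep_split (a b : Nat) :
    List.replicate (a + 1 + b) '.' = List.replicate a '.' ++ '.' :: List.replicate b '.' := by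
  rw [show a + 1 + b = a + (b + 1) by omega, List.replicate_add, List.replicate_succ]

theorem pv_splice_dots (P : List Char) (r : Nat) (s : List Char) (off : Nat)
    (h1 : P.length ≤ off) (h2 : off + s.length ≤ P.length + r) :
    pvSplice (P ++ List.replicate r '.') off s
      = (P ++ List.replicate (off - P.length) '.' ++ s)
          ++ List.replicate (P.length + r - off - s.length) '.' := by
  unfold pvSplice
  rw [List.take_append, List.drop_append,
    List.take_of_length_le h1, List.drop_eq_nil_of_le (by omega),
    List.take_replicate, List.drop_replicate]
  have e1 : min (off - P.length) r = off - P.length := by omega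
  have e2 : r - (off + s.length - P.length) = P.length + r - off - s.length := by omega
  simp [e1, e2]

theorem pvOk_le (pos : Nat) (cells : List (List Char × Nat)) (total : Nat)
    (h : pvOk pos cells total) : pos ≤ total := by
  induction cells generalizing pos with
  | nil => exact h
  | cons c t ih =>
    obtain ⟨s, o⟩ := c
    simp only [pvOk] at h
    exact le_trans (le_trans h.1 (Nat.le_add_right _ _)) (ih _ h.2)

theorem pv_canvas_fold (cells : List (List Char × Nat)) (P : List Char) (total : Nat)
    (h : pvOk P.length cells total) :
    cells.foldl (fun buf c => pvSplice buf c.2 c.1)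
        (P ++ List.replicate (total - P.length) '.')
      = pvLay P cells total := by
  induction cells generalizing P with
  | nil => simp [pvLay]
  | cons c t ih =>
    obtain ⟨s, o⟩ := c
    simp only [pvOk] at h
    have htot : o + s.length ≤ total := pvOk_le _ _ _ h.2
    have hPt : P.length ≤ total := le_trans h.1 (by omega)
    simp only [List.foldl_cons, pvLay]
    rw [pv_splice_dots P _ s o h.1 (by omega)]
    have hlen' : (P ++ List.replicate (o - P.length) '.' ++ s).length = o + s.length := by
      simp; omega
    have e : P.length + (total - P.length) - o - s.length
        = total - (P ++ List.replicate (o - P.length) '.' ++ s).length := by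
      rw [hlen']; omega
    rw [e]
    exact ih _ (by rw [hlen']; exact h.2)

theorem pv_lay_spec (rm : List String) (mm : List Nat) (hlen : rm.length = mm.length)
    (hle : ∀ p ∈ rm.zip mm, p.1.toList.length ≤ p.2)
    (rl : String) (ml : Nat) (hl : rl.toList.length ≤ ml) :
    ∀ (b : Nat) (P : List Char) (fill : Nat), P.length + fill + 1 = b →
      pvOk P.length (pvCellsMid rm mm b rl ml).1 (pvCellsMid rm mm b rl ml).2 ∧
      pvLay P (pvCellsMid rm mm b rl ml).1 (pvCellsMid rm mm b rl ml).2
        = P ++ List.replicate fill '.'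
            ++ (List.zipWith (fun v m => '.' :: pvPadC v m) rm mm).flatten
            ++ '.' :: pvPadR rl ml := by
  induction rm generalizing mm with
  | nil =>
    intro b P fill hP
    cases mm with
    | cons m mm' => simp at hlen
    | nil =>
      simp only [pvCellsMid]
      constructor
      · exact ⟨by omega, by simp only [pvOk]; omega⟩
      · have e2 : b + ml
            - (P ++ List.replicate (b + (ml - rl.toList.length) - P.length) '.'
                ++ rl.toList).length = 0 := by
          simp only [List.length_append, List.length_replicate]
          omega
        simp only [pvLay]
        rw [e2, List.replicate_zero, List.append_nil,
          show b + (ml - rl.toList.length) - P.length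
            = fill + 1 + (ml - rl.toList.length) by omega,
          pv_rep_split]
        simp [pvPadR, List.zipWith_nil_right]
  | cons r rm' ih =>
    intro b P fill hP
    cases mm with
    | nil => simp at hlen
    | cons m mm' =>
      have hrm : r.toList.length ≤ m := hle (r, m) (by simp)
      simp only [pvCellsMid]
      have hd2 : (m - r.toList.length) / 2 ≤ m - r.toList.length := Nat.div_le_self _ _
      have hoff : b + (m - r.toList.length) / 2 - P.length
          = fill + 1 + (m - r.toList.length) / 2 := by omega
      have hP' : (P ++ List.replicate (b + (m - r.toList.length) / 2 - P.length) '.'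
          ++ r.toList).length
            + ((m - r.toList.length) - (m - r.toList.length) / 2) + 1 = b + m + 1 := by
        simp only [List.length_append, List.length_replicate]
        omega
      obtain ⟨hok, hlay⟩ := ih mm' (by simpa using hlen)
        (fun p hp => hle p (by simp [hp])) (b + m + 1) _ _ hP'
      constructor
      · refine ⟨by omega, ?_⟩
        have : (P ++ List.replicate (b + (m - r.toList.length) / 2 - P.length) '.'
            ++ r.toList).length = b + (m - r.toList.length) / 2 + r.toList.length := by
          simp only [List.length_append, List.length_replicate]
          omega
        rw [this] at hok
        exact hok
      · simp only [pvLay]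
        rw [hlay, hoff, pv_rep_split]
        simp [pvPadC, List.zipWith_cons_cons]

theorem pv_slice_1_neg1 {α : Type} (xs : List α) :
    PySem.List.slice xs (some 1) (some (-1)) = xs.tail.dropLast := by
  cases xs with
  | nil => simp [PySem.List.slice, PySem.List.clampIdx]
  | cons a l =>
    simp [PySem.List.slice, PySem.List.clampIdx, List.dropLast_eq_take]
    split <;> omega

theorem pv_fold (ms : List Nat) (xs : List String) (ws : List Nat) (i : Nat) (acc : List Char)
    (hw : ∀ j < xs.length, ms.getD (i + j) 0 = ws.getD j 0) (hlen : xs.length = ws.length) :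
    (PySem.List.enumerate xs (i : Int)).foldl
        (fun l p => l ++ '.' :: pvPadC p.2 (ms.getD p.1.toNat 0)) acc
      = acc ++ (List.zipWith (fun v m => '.' :: pvPadC v m) xs ws).flatten := by
  induction xs generalizing ws i acc with
  | nil => simp [PySem.List.enumerate_nil]
  | cons x xs' ih =>
    cases ws with
    | nil => simp at hlen
    | cons w ws' =>
      rw [PySem.List.enumerate_cons]
      simp only [List.foldl_cons, List.zipWith_cons_cons, List.flatten_cons]
      have h0 : ms.getD i 0 = w := by simpa using hw 0 (by simp)
      have hstep : (i : Int) + 1 = ((i + 1 : Nat) : Int) := by push_cast; ring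
      rw [hstep, ih ws' (i + 1) _ (fun j hj => by
            have := hw (j + 1) (by simpa using Nat.succ_lt_succ hj)
            simpa [Nat.add_assoc, Nat.add_comm 1 j] using this)
          (by simpa using hlen)]
      simp only [List.getD] at h0
      simp [h0]

-- A's line on a row of length ≥ 2, expanded to the raw concatenation
theorem pv_lineA_expand (m0 mlast : Nat) (msmid : List Nat) (r0 rlast : String)
    (rmid : List String) (hlen : rmid.length = msmid.length) :
    pvLineA (m0 :: (msmid ++ [mlast])) (r0 :: (rmid ++ [rlast]))
      = pvPadL r0 m0 ++ (List.zipWith (fun v m => '.' :: pvPadC v m) rmid msmid).flatten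
          ++ '.' :: pvPadR rlast mlast := by
  unfold pvLineA
  rw [pv_slice_1_neg1]
  simp only [List.tail_cons, List.dropLast_concat, List.headD_cons]
  rw [show ((1:Int)) = ((1:Nat):Int) by norm_num]
  rw [pv_fold (m0 :: (msmid ++ [mlast])) rmid msmid 1 _
        (fun j hj => by
          simp only [Nat.add_comm 1 j, List.getD]
          rw [List.getElem?_cons_succ, List.getElem?_append_left (hlen ▸ hj)])
        hlen]
  rw [show r0 :: (rmid ++ [rlast]) = (r0 :: rmid) ++ [rlast] by simp,
    show m0 :: (msmid ++ [mlast]) = (m0 :: msmid) ++ [mlast] by simp,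
    List.getLastD_concat, List.getLastD_concat]

-- A's line on a single-element row
theorem pv_lineA_single (m0 : Nat) (x : String) :
    pvLineA [m0] [x] = pvPadL x m0 ++ '.' :: pvPadR x m0 := by
  unfold pvLineA
  rw [pv_slice_1_neg1]
  simp [PySem.List.enumerate_nil]

-- the value/offset of one slot of B, at row i
def pvToCell (i : Nat) (p : (List String × Nat × Char) × Nat) : List Char × Nat :=
  (((p.1.1).getD i "").toList,
    pvOff p.2 p.1.2.1 ((p.1.1).getD i "").toList.length p.1.2.2)

theorem pvLineB_eq_cells (l : List ((List String × Nat × Char) × Nat)) (total i : Nat) :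
    pvLineB l total i
      = (l.map (pvToCell i)).foldl (fun buf c => pvSplice buf c.2 c.1)
          (List.replicate total '.') := by
  unfold pvLineB
  rw [List.foldl_map]
  rfl

theorem pv_cells_of_port (i : Nat) (clast : List String) (mlast : Nat)
    (hl : ((clast.getD i "").toList).length ≤ mlast) :
    ∀ (mids : List (List String)) (ws : List Nat), mids.length = ws.length → ∀ (b : Nat),
      ((List.zipWith (fun c w => (c, w, 'c')) mids ws
          ++ [(clast, mlast, 'r')]).zip
        (pvStarts (List.zipWith (fun c w => (c, w, 'c')) mids ws
          ++ [(clast, mlast, 'r')]) b).1).map (pvToCell i)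
        = (pvCellsMid (mids.map (fun c => c.getD i "")) ws b (clast.getD i "") mlast).1
      ∧ (pvStarts (List.zipWith (fun c w => (c, w, 'c')) mids ws
          ++ [(clast, mlast, 'r')]) b).2
        = (pvCellsMid (mids.map (fun c => c.getD i "")) ws b (clast.getD i "") mlast).2 + 1 := by
  intro mids
  induction mids with
  | nil =>
    intro ws hlen b
    cases ws with
    | cons w ws' => simp at hlen
    | nil =>
      simp only [List.zipWith_nil_left, List.nil_append, pvStarts, List.map_nil, pvCellsMid]
      constructor
      · have e : b + mlast - (clast.getD i "").toList.length
            = b + (mlast - (clast.getD i "").toList.length) := by omega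
        simp only [List.zip_cons_cons, List.zip_nil_right, List.map_cons, List.map_nil,
          pvToCell, pvOff, if_true, e]
        rw [if_neg (by decide : ¬(('r' : Char) = 'l'))]
      · simp
  | cons c cs ih =>
    intro ws hlen b
    cases ws with
    | nil => simp at hlen
    | cons w ws' =>
      simp only [List.zipWith_cons_cons, List.cons_append, pvStarts, List.zip_cons_cons,
        List.map_cons, pvCellsMid]
      obtain ⟨ih1, ih2⟩ := ih ws' (by simpa using hlen) (b + w + 1)
      refine ⟨?_, by simpa using ih2⟩
      simp only [pvToCell, pvOff]
      rw [if_neg (by decide : ¬(('c' : Char) = 'l')),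
        if_neg (by decide : ¬(('c' : Char) = 'r'))]
      exact congrArg _ ih1

-- (col.getD i "") is an element of col whenever i < col.length, and its length is ≤ pvColMax
theorem pv_foldl_max_le_init (col : List String) (acc : Nat) :
    acc ≤ col.foldl (fun m s => max m s.toList.length) acc := by
  induction col generalizing acc with
  | nil => exact le_refl _
  | cons a t ih => exact le_trans (Nat.le_max_left _ _) (ih _)

theorem pv_le_colMax (col : List String) (s : String) (hs : s ∈ col) :
    s.toList.length ≤ pvColMax col := by
  unfold pvColMax
  generalize 0 = acc
  induction col generalizing acc with
  | nil => simp at hs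
  | cons a t ih =>
    rcases List.mem_cons.mp hs with h | h
    · subst h
      exact le_trans (Nat.le_max_right _ _) (pv_foldl_max_le_init _ _)
    · exact ih h _

theorem pv_getD_le_colMax (col : List String) (i : Nat) (hi : i < col.length) :
    ((col.getD i "").toList).length ≤ pvColMax col :=
  pv_le_colMax col _ (by rw [List.getD_eq_getElem _ _ hi]; exact List.getElem_mem hi)

-- the one line of B equals the one line of A, on a row all of whose cells exist
theorem pv_lineB_eq (c0 clast : List String) (mid : List (List String)) (i : Nat)
    (hi0 : i < c0.length) (hil : i < clast.length) (him : ∀ c ∈ mid, i < c.length) :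
    pvLineB
        (((c0, pvColMax c0, 'l') ::
            (List.zipWith (fun c w => (c, w, 'c')) mid (mid.map pvColMax)
              ++ [(clast, pvColMax clast, 'r')])).zip
          (pvStarts ((c0, pvColMax c0, 'l') ::
            (List.zipWith (fun c w => (c, w, 'c')) mid (mid.map pvColMax)
              ++ [(clast, pvColMax clast, 'r')])) 0).1)
        ((pvStarts ((c0, pvColMax c0, 'l') ::
            (List.zipWith (fun c w => (c, w, 'c')) mid (mid.map pvColMax)
              ++ [(clast, pvColMax clast, 'r')])) 0).2 - 1) i
      = pvPadL (c0.getD i "") (pvColMax c0)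
          ++ (List.zipWith (fun v m => '.' :: pvPadC v m)
                (mid.map (fun c => c.getD i "")) (mid.map pvColMax)).flatten
          ++ '.' :: pvPadR (clast.getD i "") (pvColMax clast) := by
  have hl : ((clast.getD i "").toList).length ≤ pvColMax clast :=
    pv_getD_le_colMax clast i hil
  have h0 : ((c0.getD i "").toList).length ≤ pvColMax c0 :=
    pv_getD_le_colMax c0 i hi0
  obtain ⟨hcells, htot⟩ :=
    pv_cells_of_port i clast (pvColMax clast) hl mid (mid.map pvColMax) (by simp)
      (0 + pvColMax c0 + 1)
  have hle : ∀ p ∈ (mid.map (fun c => c.getD i "")).zip (mid.map pvColMax),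
      p.1.toList.length ≤ p.2 := by
    intro p hp
    rw [List.zip_map'] at hp
    obtain ⟨c, hc, rfl⟩ := List.mem_map.mp hp
    exact pv_getD_le_colMax c i (him c hc)
  obtain ⟨hok, hlay⟩ :=
    pv_lay_spec (mid.map (fun c => c.getD i "")) (mid.map pvColMax) (by simp) hle
      (clast.getD i "") (pvColMax clast) hl (0 + pvColMax c0 + 1)
      ((c0.getD i "").toList) (pvColMax c0 - ((c0.getD i "").toList).length) (by omega)
  rw [pvLineB_eq_cells]
  simp only [pvStarts, List.zip_cons_cons, List.map_cons, hcells, htot,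
    Nat.add_sub_cancel]
  have hcell0 : pvToCell i ((c0, pvColMax c0, 'l'), 0) = ((c0.getD i "").toList, 0) := by
    simp [pvToCell, pvOff]
  rw [hcell0]
  have hinit : List.replicate
      ((pvCellsMid (mid.map (fun c => c.getD i "")) (mid.map pvColMax)
        (0 + pvColMax c0 + 1) (clast.getD i "") (pvColMax clast)).2) '.'
      = ([] : List Char) ++ List.replicate
        ((pvCellsMid (mid.map (fun c => c.getD i "")) (mid.map pvColMax)
          (0 + pvColMax c0 + 1) (clast.getD i "") (pvColMax clast)).2
          - ([] : List Char).length) '.' := by simp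
  have hok0 : pvOk ([] : List Char).length
      (((c0.getD i "").toList, 0) ::
        (pvCellsMid (mid.map (fun c => c.getD i "")) (mid.map pvColMax)
          (0 + pvColMax c0 + 1) (clast.getD i "") (pvColMax clast)).1)
      ((pvCellsMid (mid.map (fun c => c.getD i "")) (mid.map pvColMax)
        (0 + pvColMax c0 + 1) (clast.getD i "") (pvColMax clast)).2) :=
    ⟨Nat.zero_le _, by simpa using hok⟩
  rw [hinit, pv_canvas_fold _ ([] : List Char) _ hok0]
  simp only [pvLay, List.length_nil, Nat.sub_zero, List.replicate_zero,
    List.append_nil, List.nil_append]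
  rw [hlay]
  simp [pvPadL]

theorem pv_foldl_min_pred (t : List Nat) (x : Nat) :
    (t.map (fun k => k - 1)).foldl min (x - 1) = t.foldl min x - 1 := by
  induction t generalizing x with
  | nil => rfl
  | cons a t' ih =>
    simp only [List.map_cons, List.foldl_cons]
    rw [show min (x - 1) (a - 1) = min x a - 1 by omega]
    exact ih _

theorem pv_heads_eq (cols : List (List String)) (hne : ∀ c ∈ cols, c ≠ []) :
    cols.flatMap (List.take 1) = cols.map (fun c => c.getD 0 "") := by
  induction cols with
  | nil => rfl
  | cons c cs ih =>
    cases c with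
    | nil => exact absurd rfl (hne [] (by simp))
    | cons a t =>
      simp only [List.flatMap_cons, List.map_cons, List.getD_cons_zero]
      exact congrArg _ (ih (fun d hd => hne d (by simp [hd])))

theorem pv_tail_getD (c : List String) (i : Nat) :
    c.tail.getD i "" = c.getD (i + 1) "" := by
  cases c <;> simp [List.getD]

theorem pv_rows_range_aux :
    ∀ (N : Nat) (cols : List (List String)), (cols.map List.length).sum = N → cols ≠ [] →
      pvRows cols
        = (List.range ((PySem.List.min? (cols.map List.length) (fun y => y)).getD 0)).map
            (fun i => cols.map (fun c => c.getD i "")) := by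
  intro N
  induction N using Nat.strong_induction_on with
  | _ N ih =>
    intro cols hN hne
    obtain ⟨c, cs, rfl⟩ : ∃ c cs, cols = c :: cs := by
      cases cols with
      | nil => exact absurd rfl hne
      | cons c cs => exact ⟨c, cs, rfl⟩
    have hm : PySem.List.min? ((c :: cs).map List.length) (fun y => y)
        = some ((cs.map List.length).foldl min c.length) := by
      simp only [List.map_cons]
      exact PySem.List.min?_id_cons ..
    rw [pvRows, hm]
    simp only [Option.getD_some]
    by_cases hg : ((c :: cs).isEmpty || (c :: cs).any List.isEmpty) = true
    · rw [if_pos hg]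
      have h0 : (cs.map List.length).foldl min c.length = 0 := by
        simp only [List.isEmpty_cons, Bool.false_or, List.any_eq_true] at hg
        obtain ⟨d, hd, hde⟩ := hg
        have hmin := PySem.List.min?_isMin hm d.length
          (List.mem_map.mpr ⟨d, hd, rfl⟩)
        simp only [List.isEmpty_iff] at hde
        subst hde
        have h0' : (cs.map List.length).foldl min c.length ≤ 0 := by simpa using hmin
        omega
      rw [h0]
      simp
    · rw [if_neg hg]
      have hne' : ∀ d ∈ c :: cs, d ≠ [] := by
        intro d hd h'
        simp only [Bool.or_eq_true, List.any_eq_true] at hg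
        exact hg (Or.inr ⟨d, hd, by simp [h']⟩)
      have hdec : (((c :: cs).map List.tail).map List.length).sum < N :=
        hN ▸ pvRows_dec c cs (hne' c (by simp))
      have hrec := ih _ hdec ((c :: cs).map List.tail) rfl (by simp)
      have hm' : PySem.List.min? (((c :: cs).map List.tail).map List.length) (fun y => y)
          = some ((cs.map List.length).foldl min c.length - 1) := by
        simp only [List.map_cons, List.map_map]
        rw [PySem.List.min?_id_cons]
        congr 1
        have e1 : (cs.map (List.length ∘ List.tail)) = (cs.map List.length).map
            (fun k => k - 1) := by
          rw [List.map_map]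
          apply List.map_congr_left
          intro d _
          simp [List.length_tail]
        rw [e1, show c.tail.length = c.length - 1 by simp [List.length_tail],
          pv_foldl_min_pred]
      rw [hrec, hm']
      simp only [Option.getD_some]
      have hn1 : 1 ≤ (cs.map List.length).foldl min c.length := by
        have hmem := PySem.List.min?_mem hm
        obtain ⟨d, hd, hde⟩ := List.mem_map.mp hmem
        rw [← hde]
        cases d with
        | nil => exact absurd rfl (hne' [] hd)
        | cons a t => simp
      obtain ⟨k, hk⟩ : ∃ k, (cs.map List.length).foldl min c.length = k + 1 :=
        ⟨(cs.map List.length).foldl min c.length - 1, by omega⟩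
      rw [hk]
      simp only [Nat.add_sub_cancel]
      rw [List.range_succ_eq_map]
      simp only [List.map_cons, List.map_map]
      congr 1
      · exact pv_heads_eq _ hne'
      · apply List.map_congr_left
        intro i _
        simp only [Function.comp_apply, Nat.succ_eq_add_one]
        congr 1
        · exact pv_tail_getD c i
        · apply List.map_congr_left
          intro d _
          simp only [Function.comp_apply]
          exact pv_tail_getD d i

theorem pv_rows_range (cols : List (List String)) (hne : cols ≠ []) :
    pvRows cols
      = (List.range ((PySem.List.min? (cols.map List.length) (fun y => y)).getD 0)).map
          (fun i => cols.map (fun c => c.getD i "")) :=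
  pv_rows_range_aux _ cols rfl hne

theorem pv_n_le (cols : List (List String)) (hne : cols ≠ []) (c : List String)
    (hc : c ∈ cols) :
    (PySem.List.min? (cols.map List.length) (fun y => y)).getD 0 ≤ c.length := by
  obtain ⟨d, ds, rfl⟩ : ∃ d ds, cols = d :: ds := by
    cases cols with
    | nil => exact absurd rfl hne
    | cons d ds => exact ⟨d, ds, rfl⟩
  have hm : PySem.List.min? ((d :: ds).map List.length) (fun y => y)
      = some ((ds.map List.length).foldl min d.length) := by
    simp only [List.map_cons]
    exact PySem.List.min?_id_cons ..
  rw [hm]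
  simpa using PySem.List.min?_isMin hm c.length (List.mem_map.mpr ⟨c, hc, rfl⟩)

-- the whole table of A equals the whole list of lines of B
theorem pv_table_eq (cols : List (List String)) (hne : cols ≠ [])
    (hall : ∀ c ∈ cols, c ≠ []) :
    pvTableA cols
      = (List.range ((PySem.List.min? (cols.map List.length) (fun y => y)).getD 0)).map
          (fun i =>
            pvLineB
              (((cols.headD [], (cols.map pvColMax).headD 0, 'l') ::
                  (List.zipWith (fun c w => (c, w, 'c'))
                      (PySem.List.slice cols (some 1) (some (-1)))
                      (PySem.List.slice (cols.map pvColMax) (some 1) (some (-1)))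
                    ++ [(cols.getLastD [], (cols.map pvColMax).getLastD 0, 'r')])).zip
                (pvStarts ((cols.headD [], (cols.map pvColMax).headD 0, 'l') ::
                  (List.zipWith (fun c w => (c, w, 'c'))
                      (PySem.List.slice cols (some 1) (some (-1)))
                      (PySem.List.slice (cols.map pvColMax) (some 1) (some (-1)))
                    ++ [(cols.getLastD [], (cols.map pvColMax).getLastD 0, 'r')])) 0).1)
              ((pvStarts ((cols.headD [], (cols.map pvColMax).headD 0, 'l') ::
                  (List.zipWith (fun c w => (c, w, 'c'))
                      (PySem.List.slice cols (some 1) (some (-1)))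
                      (PySem.List.slice (cols.map pvColMax) (some 1) (some (-1)))
                    ++ [(cols.getLastD [], (cols.map pvColMax).getLastD 0, 'r')])) 0).2 - 1)
              i) := by
  rw [pvTableA, pv_rows_range cols hne, List.map_map]
  apply List.map_congr_left
  intro i hi
  have hin : i < (PySem.List.min? (cols.map List.length) (fun y => y)).getD 0 :=
    List.mem_range.mp hi
  obtain ⟨c0, rest, rfl⟩ : ∃ c0 rest, cols = c0 :: rest := by
    cases cols with
    | nil => exact absurd rfl hne
    | cons c0 rest => exact ⟨c0, rest, rfl⟩
  have hi0 : i < c0.length := lt_of_lt_of_le hin (pv_n_le _ hne c0 (by simp))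
  cases rest with
  | nil =>
    simp only [Function.comp, List.map_cons, List.map_nil, List.headD_cons,
      List.getLastD_cons, List.getLastD_nil, pv_slice_1_neg1, List.tail_cons,
      List.dropLast_nil, List.zipWith_nil_left, List.nil_append]
    rw [pv_lineA_single]
    have := pv_lineB_eq c0 c0 [] i hi0 hi0 (by simp)
    simp only [List.map_nil, List.zipWith_nil_left, List.nil_append] at this
    rw [this]
    simp
  | cons c1 rest' =>
    have h1 : (c1 :: rest') ≠ [] := by simp
    obtain ⟨mid, clast, hmc⟩ : ∃ mid clast, c1 :: rest' = mid ++ [clast] :=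
      ⟨(c1 :: rest').dropLast, (c1 :: rest').getLast h1,
        (List.dropLast_append_getLast h1).symm⟩
    rw [hmc]
    simp only [Function.comp]
    rw [show (c0 :: (mid ++ [clast])).map (fun c => c.getD i "")
        = (c0.getD i "") :: ((mid.map (fun c => c.getD i "")) ++ [clast.getD i ""]) by
      simp]
    rw [show (c0 :: (mid ++ [clast])).map pvColMax
        = pvColMax c0 :: ((mid.map pvColMax) ++ [pvColMax clast]) by simp]
    rw [pv_lineA_expand _ _ _ _ _ _ (by simp)]
    have hslc : PySem.List.slice (c0 :: (mid ++ [clast])) (some 1) (some (-1)) = mid := by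
      rw [pv_slice_1_neg1]
      simp
    have hslw : PySem.List.slice
        (pvColMax c0 :: ((mid.map pvColMax) ++ [pvColMax clast])) (some 1) (some (-1))
        = mid.map pvColMax := by
      rw [pv_slice_1_neg1]
      simp
    have hgl : (c0 :: (mid ++ [clast])).getLastD [] = clast := by
      rw [show c0 :: (mid ++ [clast]) = (c0 :: mid) ++ [clast] by simp,
        List.getLastD_concat]
    have hglw : (pvColMax c0 :: ((mid.map pvColMax) ++ [pvColMax clast])).getLastD 0
        = pvColMax clast := by
      rw [show pvColMax c0 :: ((mid.map pvColMax) ++ [pvColMax clast])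
          = (pvColMax c0 :: mid.map pvColMax) ++ [pvColMax clast] by simp,
        List.getLastD_concat]
    simp only [List.headD_cons, hslc, hslw, hgl, hglw]
    have hil : i < clast.length :=
      lt_of_lt_of_le hin (pv_n_le _ hne clast (by simp [hmc]))
    have him : ∀ c ∈ mid, i < c.length := fun c hcm =>
      lt_of_lt_of_le hin (pv_n_le _ hne c (by simp [hmc, hcm]))
    exact (pv_lineB_eq c0 clast mid i hi0 hil him).symm

-- ===== VERDICT (by name: the statement is the Claim_ definition above) =====
theorem columns_to_table_spec : Claim_equal_columns_to_table := by
  intro columns numerate _ hpre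
  simp only [Spec_columns_to_table, columns_to_table, columns_to_table_alt]
  cases hcase : (if numerate then pvNums columns :: columns else columns) with
  | nil =>
    simp only [List.isEmpty_nil, if_true]
    rw [pvTableA, pvRows]
    simp only [List.isEmpty_nil, Bool.true_or, if_true, List.map_nil]
    rw [PySem.Chars.join_nil]
    decide
  | cons d ds =>
    have hall : ∀ c ∈ d :: ds, c ≠ [] := by
      rw [← hcase]
      intro c hcc
      cases numerate with
      | false =>
        simp only [if_neg Bool.false_ne_true] at hcc
        exact hpre.2 c hcc
      | true =>
        simp only at hcc
        rcases List.mem_cons.mp hcc with h | h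
        · subst h
          simp [pvNums]
        · exact hpre.2 c h
    simp only [List.isEmpty_cons, Bool.false_eq_true, if_false]
    rw [pv_table_eq (d :: ds) (by simp) hall]
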